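-- pv_equiv track=rewrite | github.com/kacper0276/Programming_Challenges | Najmniej - ale ale (a4c).py | min2Digit
-- ===== SOURCE A (Python) =====
-- def min2Digit(num):
--     digit = 0
--     while num > 0:
--         num = int(num / 10)
--         digit += 1
--         if digit >= 2:
--             return True
--     return False
-- ===== SOURCE B (Python) =====
-- def min2Digit(num):
--     return num >= 10
-- ===== Notes on version B (the rewrite author's own statement) =====
-- stated objective: simpler
-- what changed: The digit-counting division loop is replaced by a single closed-form comparison against ten, which is all the loop ever decides.
import Mathlib
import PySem

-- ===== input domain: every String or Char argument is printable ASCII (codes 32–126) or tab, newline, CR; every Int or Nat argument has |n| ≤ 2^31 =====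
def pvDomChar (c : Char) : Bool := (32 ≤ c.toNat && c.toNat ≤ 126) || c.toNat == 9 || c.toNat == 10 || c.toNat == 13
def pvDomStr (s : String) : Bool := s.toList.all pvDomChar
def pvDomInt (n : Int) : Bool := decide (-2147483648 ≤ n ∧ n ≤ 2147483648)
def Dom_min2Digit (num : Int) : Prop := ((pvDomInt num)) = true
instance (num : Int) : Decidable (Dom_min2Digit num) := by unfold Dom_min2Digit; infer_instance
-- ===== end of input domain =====

-- B replaces A's digit-counting division loop by the closed-form comparison num >= 10 (simpler).

-- ===== PORT A =====
-- while num > 0: num = int(num / 10); digit += 1; if digit >= 2: return True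
-- (int(num/10) = floor division for the positive num the loop runs on; exact on Dom's range)
def min2DigitLoop (num digit : Int) : Bool :=
  if h : num > 0 then
    let num' := PySem.Int.floordiv num 10
    let digit' := digit + 1
    if digit' ≥ 2 then true
    else min2DigitLoop num' digit'
  else false
termination_by num.toNat
decreasing_by
  have h10 : PySem.Int.floordiv num 10 = num / 10 :=
    PySem.Int.floordiv_eq_ediv_of_pos (by omega)
  simp only [h10]
  omega

def min2Digit (num : Int) : Bool := min2DigitLoop num 0

-- ===== PORT B =====
def min2Digit_alt (num : Int) : Bool := num ≥ 10

-- ===== PRECONDITION & SPEC =====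
def Spec_min2Digit (num : Int) (out : Bool) : Prop := out = min2Digit_alt num
instance (num : Int) (out : Bool) : Decidable (Spec_min2Digit num out) := by unfold Spec_min2Digit; infer_instance

-- ===== CLAIM (what is proved, stated in full; the proofs are below) =====
def Claim_equal_min2Digit : Prop := ∀ (num : Int), Dom_min2Digit num → Spec_min2Digit num (min2Digit num)

-- ===== LEMMAS AND PROOFS =====
theorem min2DigitLoop_unfold (num digit : Int) :
    min2DigitLoop num digit =
      if num > 0 then
        (if digit + 1 ≥ 2 then true else min2DigitLoop (PySem.Int.floordiv num 10) (digit + 1))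
      else false := by
  rw [min2DigitLoop]
  split <;> simp_all

-- ===== VERDICT (by name: the statement is the Claim_ definition above) =====
theorem min2Digit_spec : Claim_equal_min2Digit := by
  intro num _
  unfold Spec_min2Digit min2Digit min2Digit_alt
  rw [min2DigitLoop_unfold]
  by_cases h : num > 0
  · have h10 : PySem.Int.floordiv num 10 = num / 10 :=
      PySem.Int.floordiv_eq_ediv_of_pos (by omega)
    rw [min2DigitLoop_unfold]
    simp only [h, if_pos, h10]
    by_cases h2 : num ≥ 10
    · have : num / 10 > 0 := by omega
      simp [this, h2]
    · have : ¬ num / 10 > 0 := by omega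
      simp [this, h2]
  · have : ¬ num ≥ 10 := by omega
    simp [h, this]
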